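-- pv_equiv track=rewrite | github.com/thierryxdp/TCC | problems/817/solution_298800.py | maiores
-- ===== SOURCE A (Python) =====
-- def maiores(lista,n):
--     """Dada uma lista de números inteiros e um número inteiro 'n', retorna outra lista contendo
--     todos os números maiores que 'n' na lista original, ordenados em ordem crescente; tuple or
--     list, int -> list"""
--     lista = list(lista)
--     lista.sort()
--     if lista[0] <= n:
--         for tamanho in range(len(lista)):
--             if lista[0] <= n:
--                 del(lista[0])
--     return lista
-- ===== SOURCE B (Python) =====
-- def maiores(lista, n):
--     """Filter once, then sort the survivors: O(k log k) instead of A's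
--     sort + repeated deletion from the front (quadratic)."""
--     return sorted(x for x in lista if x > n)
-- ===== Notes on version B (the rewrite author's own statement) =====
-- stated objective: faster
-- what changed: A sorts the whole list and then deletes elements <= n one at a time from the front (each del is O(n)); B filters the elements > n in one pass and sorts only the survivors.
import Mathlib
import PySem

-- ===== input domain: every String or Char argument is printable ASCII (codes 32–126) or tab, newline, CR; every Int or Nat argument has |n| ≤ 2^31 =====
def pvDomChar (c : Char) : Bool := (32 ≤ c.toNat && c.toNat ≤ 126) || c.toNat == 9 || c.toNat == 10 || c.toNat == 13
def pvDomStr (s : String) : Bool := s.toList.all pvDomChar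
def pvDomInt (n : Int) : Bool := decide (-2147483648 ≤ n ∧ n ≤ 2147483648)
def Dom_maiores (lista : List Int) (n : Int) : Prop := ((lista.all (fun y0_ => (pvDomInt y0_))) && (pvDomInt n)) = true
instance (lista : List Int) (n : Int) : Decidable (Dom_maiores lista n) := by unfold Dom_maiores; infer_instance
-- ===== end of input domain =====

-- B filters once then sorts the survivors instead of A's sort + front-deletion loop;
-- equivalence is about the return value only (A rebinds, never mutates, its argument).

-- ===== PORT A =====
-- one loop iteration: 'if lista[0] <= n: del(lista[0])'; the 'none' case is where
-- Python's lista[0] would raise IndexError (unreachable from a nonempty start)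
def maioresStep (n : Int) (st : List Int) : List Int :=
  match PySem.List.pyGet? st 0 with
  | some h => if h ≤ n then st.tail else st
  | none => st

def maiores (lista : List Int) (n : Int) : List Int :=
  let s := PySem.List.sorted lista (fun x => x) false
  match PySem.List.pyGet? s 0 with
  | some h =>
      if h ≤ n then
        (PySem.List.pyRange 0 (s.length : Int) 1).foldl (fun st _ => maioresStep n st) s
      else s
  | none => []  -- Python raises IndexError here (empty list); excluded by Pre_maiores

-- ===== PORT B =====
def maiores_alt (lista : List Int) (n : Int) : List Int :=
  PySem.List.sorted (lista.filter (fun x => n < x)) (fun x => x) false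

-- ===== PRECONDITION & SPEC =====
-- A evaluates lista[0] after sorting, so it raises IndexError on the empty list
def Pre_maiores (lista : List Int) (n : Int) : Prop := lista ≠ []
instance (lista : List Int) (n : Int) : Decidable (Pre_maiores lista n) := by unfold Pre_maiores; infer_instance
def pvWitness_maiores : List Int × Int := ([3, 1, 2], 1)

def Spec_maiores (lista : List Int) (n : Int) (out : List Int) : Prop := out = maiores_alt lista n
instance (lista : List Int) (n : Int) (out : List Int) : Decidable (Spec_maiores lista n out) := by unfold Spec_maiores; infer_instance

-- ===== CLAIM (what is proved, stated in full; the proofs are below) =====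
def Claim_equal_maiores : Prop := ∀ (lista : List Int) (n : Int), Dom_maiores lista n → Pre_maiores lista n → Spec_maiores lista n (maiores lista n)

-- ===== LEMMAS AND PROOFS =====

-- a fold over an index range whose body ignores the index is an iterate
theorem foldl_ignore_iterate (f : List Int → List Int) (r : List Int) (s : List Int) :
    r.foldl (fun st _ => f st) s = f^[r.length] s := by
  induction r generalizing s with
  | nil => rfl
  | cons a t ih => simp [List.foldl_cons, ih, Function.iterate_succ_apply]

theorem maioresStep_nil (n : Int) : maioresStep n [] = [] := rfl

-- enough iterations of the deletion step on a sorted list drop the whole ≤-n prefix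
theorem iterate_step_dropWhile (n : Int) :
    ∀ (k : Nat) (st : List Int), st.Pairwise (· ≤ ·) → st.length ≤ k →
      (maioresStep n)^[k] st = st.dropWhile (fun x => decide (x ≤ n)) := by
  intro k
  induction k with
  | zero =>
    intro st _ hlen
    have : st = [] := List.eq_nil_of_length_eq_zero (Nat.le_zero.mp hlen)
    simp [this]
  | succ k ih =>
    intro st hpw hlen
    cases st with
    | nil => simp [Function.iterate_fixed (maioresStep_nil n) (k+1)]
    | cons h t =>
      by_cases hn : h ≤ n
      · have hstep : maioresStep n (h :: t) = t := by
          simp [maioresStep, PySem.List.pyGet?, PySem.List.pyIdx?, hn]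
        rw [Function.iterate_succ_apply, hstep,
          ih t (List.Pairwise.of_cons hpw) (by simpa using Nat.lt_succ_iff.mp hlen)]
        simp [hn]
      · have hstep : maioresStep n (h :: t) = h :: t := by
          simp [maioresStep, PySem.List.pyGet?, PySem.List.pyIdx?, hn]
        rw [Function.iterate_fixed hstep (k+1)]
        simp [hn]

-- on a ≤-sorted list, dropping the leading ≤-n prefix is filtering for > n
theorem dropWhile_eq_filter_of_sorted (n : Int) :
    ∀ (s : List Int), s.Pairwise (· ≤ ·) →
      s.dropWhile (fun x => decide (x ≤ n)) = s.filter (fun x => decide (n < x)) := by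
  intro s
  induction s with
  | nil => intro _; rfl
  | cons h t ih =>
    intro hpw
    by_cases hn : h ≤ n
    · simp only [List.dropWhile_cons, List.filter_cons, decide_eq_true hn]
      simpa [show ¬ n < h by omega] using ih (List.Pairwise.of_cons hpw)
    · have hlt : n < h := by omega
      simp only [List.dropWhile_cons, List.filter_cons, hn, decide_false, decide_eq_true hlt]
      simp only [Bool.false_eq_true, if_false, if_true]
      have : t.filter (fun x => decide (n < x)) = t := by
        apply List.filter_eq_self.mpr
        intro a ha
        have := (List.pairwise_cons.mp hpw).1 a ha
        simp; omega
      rw [this]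

-- sorting the filtered list equals filtering the sorted list
theorem sorted_filter_comm (lista : List Int) (n : Int) :
    PySem.List.sorted (lista.filter (fun x => n < x)) (fun x => x) false
      = (PySem.List.sorted lista (fun x => x) false).filter (fun x => n < x) := by
  apply PySem.List.sorted_id_eq_of_perm_of_pairwise
  · exact (PySem.List.sorted_perm lista (fun x => x) false).filter _
  · exact List.Pairwise.filter _ (by simpa using PySem.List.sorted_pairwise lista (fun x => x))

-- ===== VERDICT (by name: the statement is the Claim_ definition above) =====
theorem maiores_spec : Claim_equal_maiores := by
  intro lista n _ hpre
  unfold Spec_maiores maiores maiores_alt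
  rw [sorted_filter_comm]
  have hpw : (PySem.List.sorted lista (fun x => x) false).Pairwise (· ≤ ·) := by
    simpa using PySem.List.sorted_pairwise lista (fun x => x)
  have hsne : PySem.List.sorted lista (fun x => x) false ≠ [] := by
    intro h; exact hpre ((PySem.List.sorted_eq_nil_iff lista (fun x => x) false).mp h)
  cases hs : PySem.List.sorted lista (fun x => x) false with
  | nil => exact absurd hs hsne
  | cons h t =>
    rw [hs] at hpw
    have hget : PySem.List.pyGet? (h :: t) 0 = some h := by
      simp [PySem.List.pyGet?, PySem.List.pyIdx?]
    simp only [hget]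
    by_cases hn : h ≤ n
    · simp only [hn, if_true]
      rw [foldl_ignore_iterate, PySem.List.length_pyRange_one,
        iterate_step_dropWhile n _ (h :: t) hpw (by simp),
        dropWhile_eq_filter_of_sorted n (h :: t) hpw]
    · simp only [hn, if_false]
      symm
      apply List.filter_eq_self.mpr
      intro a ha
      have hha : h ≤ a := by
        rcases List.mem_cons.mp ha with rfl | hat
        · exact le_refl _
        · exact (List.pairwise_cons.mp hpw).1 a hat
      simp; omega
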